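-- pv_equiv track=rewrite | github.com/daijinma/geo_marketing | scripts/analyze_sites.py | analyze_sites
-- ===== SOURCE A (Python) =====
-- from collections import defaultdict
-- from typing import Dict, List, Set
--
-- def analyze_sites(queries_data: Dict[str, List[Dict]]) -> tuple:
--     """
--     分析网站关联关系
--     返回: (每个搜索词的网站列表, 整体统计分布)
--     """
--     # 每个搜索词关联的网站
--     query_sites: Dict[str, Set[str]] = defaultdict(set)
--
--     # 整体统计：每个网站出现的总次数
--     site_count: Dict[str, int] = defaultdict(int)
--
--     # 每个搜索词中每个网站出现的次数
--     query_site_count: Dict[str, Dict[str, int]] = defaultdict(lambda: defaultdict(int))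
--
--     for query, results in queries_data.items():
--         for result in results:
--             site_name = result.get('site_name', '未知网站')
--             if site_name:
--                 query_sites[query].add(site_name)
--                 site_count[site_name] += 1
--                 query_site_count[query][site_name] += 1
--
--     return query_sites, site_count, query_site_count
-- ===== SOURCE B (Python) =====
-- from collections import defaultdict
--
-- def analyze_sites(queries_data):
--     # Stage 1: flatten the nested input into a flat (query, site) event list,
--     # dropping falsy site names exactly as A does.
--     events = [(query, site)
--               for query, results in queries_data.items()
--               for site in (r.get('site_name', '未知网站') for r in results)
--               if site]
--     # Stage 2: three independent single passes over the flat event list.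
--     query_sites = defaultdict(set)
--     for query, site in events:
--         query_sites[query].add(site)
--     site_count = defaultdict(int)
--     for site in [s for _, s in events]:
--         site_count[site] += 1
--     query_site_count = defaultdict(lambda: defaultdict(int))
--     for query, site in events:
--         query_site_count[query][site] += 1
--     return query_sites, site_count, query_site_count
-- ===== Notes on version B (the rewrite author's own statement) =====
-- stated objective: alternative
-- what changed: B first flattens the nested queries/results structure into a flat list of (query, site) events and then builds each of the three tables in its own independent pass over that flat list, instead of A's single nested loop that updates all three tables at once.
import Mathlib
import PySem

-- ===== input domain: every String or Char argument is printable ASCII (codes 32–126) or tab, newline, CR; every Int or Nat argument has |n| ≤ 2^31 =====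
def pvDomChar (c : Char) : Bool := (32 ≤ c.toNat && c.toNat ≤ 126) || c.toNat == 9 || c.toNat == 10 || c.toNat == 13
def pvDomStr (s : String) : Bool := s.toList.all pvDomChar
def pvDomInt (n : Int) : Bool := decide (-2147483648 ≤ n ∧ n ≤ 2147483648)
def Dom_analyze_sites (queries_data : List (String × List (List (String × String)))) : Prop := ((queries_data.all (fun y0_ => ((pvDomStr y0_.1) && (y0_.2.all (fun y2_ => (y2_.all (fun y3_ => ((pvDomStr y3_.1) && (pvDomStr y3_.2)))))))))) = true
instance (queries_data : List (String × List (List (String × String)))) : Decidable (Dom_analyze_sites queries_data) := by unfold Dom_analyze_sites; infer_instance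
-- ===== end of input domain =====

-- B flattens the input to a flat (query, site) event list and builds each of the three
-- tables in its own independent pass over it, instead of A's single nested loop that
-- maintains all three tables at once (objective: alternative decomposition, same cost).

-- result.get('site_name', '未知网站'), shared by both programs:
def pvSite (result : List (String × String)) : String :=
  (PySem.Dict.mk result).getD "site_name" "未知网站"

-- ===== PORT A =====
def analyze_sites (queries_data : List (String × List (List (String × String)))) : (List (String × List String)) × (List (String × Int)) × (List (String × List (String × Int))) :=
  let st := queries_data.foldl
    (fun st qr => qr.2.foldl
      (fun st result =>
        if pvSite result ≠ "" then
          ( st.1.insert qr.1 (PySem.Set.add (st.1.getD qr.1 PySem.Set.empty) (pvSite result))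
          , st.2.1.insert (pvSite result) (st.2.1.getD (pvSite result) 0 + 1)
          , st.2.2.insert qr.1 ((st.2.2.getD qr.1 PySem.Dict.empty).insert (pvSite result)
              ((st.2.2.getD qr.1 PySem.Dict.empty).getD (pvSite result) 0 + 1)) )
        else st) st)
    (PySem.Dict.empty, PySem.Dict.empty, PySem.Dict.empty)
  (st.1.items, st.2.1.items, st.2.2.items.map (fun p => (p.1, p.2.items)))

-- ===== PORT B =====
-- the flat (query, site) event list of stage 1
def pvEvents (queries_data : List (String × List (List (String × String)))) : List (String × String) :=
  queries_data.flatMap (fun qr =>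
    qr.2.filterMap (fun r => if pvSite r ≠ "" then some (qr.1, pvSite r) else none))

def analyze_sites_alt (queries_data : List (String × List (List (String × String)))) : (List (String × List String)) × (List (String × Int)) × (List (String × List (String × Int))) :=
  let events := pvEvents queries_data
  let query_sites := events.foldl
    (fun d e => d.modify e.1 PySem.Set.empty (fun s => PySem.Set.add s e.2)) PySem.Dict.empty
  let site_count := (events.map Prod.snd).foldl
    (fun d s => d.modify s 0 (· + 1)) PySem.Dict.empty
  let query_site_count := events.foldl
    (fun d e => d.modify e.1 PySem.Dict.empty (fun c => c.modify e.2 0 (· + 1))) PySem.Dict.empty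
  (query_sites.items, site_count.items, query_site_count.items.map (fun p => (p.1, p.2.items)))

-- ===== PRECONDITION & SPEC =====
def Spec_analyze_sites (queries_data : List (String × List (List (String × String)))) (out : (List (String × List String)) × (List (String × Int)) × (List (String × List (String × Int)))) : Prop := out = analyze_sites_alt queries_data
instance (queries_data : List (String × List (List (String × String)))) (out : (List (String × List String)) × (List (String × Int)) × (List (String × List (String × Int)))) : Decidable (Spec_analyze_sites queries_data out) := by unfold Spec_analyze_sites; infer_instance

-- ===== CLAIM (what is proved, stated in full; the proofs are below) =====
def Claim_equal_analyze_sites : Prop := ∀ (queries_data : List (String × List (List (String × String)))), Dom_analyze_sites queries_data → Spec_analyze_sites queries_data (analyze_sites queries_data)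

-- ===== LEMMAS AND PROOFS =====

-- the three independent per-event table updates, and A's inner body as one step on the triple
def pvUpdQS (d : PySem.Dict String (PySem.Set String)) (e : String × String) :
    PySem.Dict String (PySem.Set String) :=
  d.insert e.1 (PySem.Set.add (d.getD e.1 PySem.Set.empty) e.2)

def pvUpdSC (d : PySem.Dict String Int) (e : String × String) : PySem.Dict String Int :=
  d.insert e.2 (d.getD e.2 0 + 1)

def pvUpdQSC (d : PySem.Dict String (PySem.Dict String Int)) (e : String × String) :
    PySem.Dict String (PySem.Dict String Int) :=
  d.insert e.1 ((d.getD e.1 PySem.Dict.empty).insert e.2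
    ((d.getD e.1 PySem.Dict.empty).getD e.2 0 + 1))

def pvStep3
    (st : PySem.Dict String (PySem.Set String) × PySem.Dict String Int × PySem.Dict String (PySem.Dict String Int))
    (e : String × String) :
    PySem.Dict String (PySem.Set String) × PySem.Dict String Int × PySem.Dict String (PySem.Dict String Int) :=
  (pvUpdQS st.1 e, pvUpdSC st.2.1 e, pvUpdQSC st.2.2 e)

-- A's nested loop, whose inner body fires exactly on the events, is the fold of its body
-- over the flat event list.
theorem pv_nested_fold_events {σ : Type} (f : σ → String × String → σ)
    (L : List (String × List (List (String × String)))) (s : σ) :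
    L.foldl (fun s qr => qr.2.foldl
        (fun s r => if pvSite r ≠ "" then f s (qr.1, pvSite r) else s) s) s
    = (pvEvents L).foldl f s := by
  induction L generalizing s with
  | nil => rfl
  | cons qr L ih =>
      simp only [List.foldl_cons, pvEvents, List.flatMap_cons, List.foldl_append, ih]
      congr 1
      rw [List.foldl_filterMap]
      apply PySem.List.foldl_congr_mem
      intro acc r _
      by_cases h : pvSite r ≠ "" <;> simp [h]

-- the fold of the triple step is the triple of the three component folds
theorem pv_foldl_step3_split (l : List (String × String))
    (a : PySem.Dict String (PySem.Set String)) (b : PySem.Dict String Int)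
    (c : PySem.Dict String (PySem.Dict String Int)) :
    l.foldl pvStep3 (a, b, c) = (l.foldl pvUpdQS a, l.foldl pvUpdSC b, l.foldl pvUpdQSC c) := by
  induction l generalizing a b c with
  | nil => rfl
  | cons e l ih =>
      simpa [pvStep3] using ih (pvUpdQS a e) (pvUpdSC b e) (pvUpdQSC c e)

theorem analyze_sites_spec_aux (queries_data : List (String × List (List (String × String)))) :
    analyze_sites queries_data = analyze_sites_alt queries_data := by
  have h3 :
      (queries_data.foldl (fun st qr => qr.2.foldl
          (fun st result => if pvSite result ≠ "" then pvStep3 st (qr.1, pvSite result) else st) st)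
        (PySem.Dict.empty, PySem.Dict.empty, PySem.Dict.empty))
      = ( (pvEvents queries_data).foldl pvUpdQS PySem.Dict.empty
        , (pvEvents queries_data).foldl pvUpdSC PySem.Dict.empty
        , (pvEvents queries_data).foldl pvUpdQSC PySem.Dict.empty ) :=
    (pv_nested_fold_events pvStep3 queries_data _).trans (pv_foldl_step3_split _ _ _ _)
  have h4 := congrArg
    (fun st : PySem.Dict String (PySem.Set String) × PySem.Dict String Int × PySem.Dict String (PySem.Dict String Int) =>
      (st.1.items, st.2.1.items, st.2.2.items.map (fun p => (p.1, p.2.items)))) h3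
  -- analyze_sites unfolds (by beta/delta/zeta) to h4's left-hand side
  refine h4.trans ?_
  have h5 : analyze_sites_alt queries_data
      = ( ((pvEvents queries_data).foldl pvUpdQS PySem.Dict.empty).items
        , (((pvEvents queries_data).map Prod.snd).foldl
            (fun d s => d.modify s 0 (· + 1)) PySem.Dict.empty).items
        , ((pvEvents queries_data).foldl pvUpdQSC PySem.Dict.empty).items.map
            (fun p => (p.1, p.2.items)) ) := rfl
  have h6 : ((pvEvents queries_data).map Prod.snd).foldl
        (fun d s => d.modify s 0 (· + 1)) PySem.Dict.empty
      = (pvEvents queries_data).foldl pvUpdSC PySem.Dict.empty := by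
    rw [List.foldl_map]
    rfl
  rw [h5, h6]

-- ===== VERDICT (by name: the statement is the Claim_ definition above) =====
theorem analyze_sites_spec : Claim_equal_analyze_sites := by
  intro queries_data _
  unfold Spec_analyze_sites
  exact analyze_sites_spec_aux queries_data
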